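-- pv_equiv track=rewrite | github.com/AaronJny/leetcode | 1-50/42.py | find_lower_pos
-- ===== SOURCE A (Python) =====
-- def find_lower_pos(height):
--     n = len(height)
--     lefts = []
--     for i in range(1, n):
--         if height[i] < height[i - 1]:
--             lefts.append(i)
--     ac = []
--     for pos in lefts:
--         for i in range(pos + 1, n):
--             if height[pos] < height[i]:
--                 ac.append(pos)
--                 break
--             elif height[pos] > height[i]:
--                 break
--             i += 1
--     return ac
-- ===== SOURCE B (Python) =====
-- def find_lower_pos(height):
--     n = len(height)
--     # nd[i] = value of the first element after i that differs from height[i], or None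
--     nd = [None] * n
--     for i in range(n - 2, -1, -1):
--         nd[i] = height[i + 1] if height[i + 1] != height[i] else nd[i + 1]
--     return [i for i in range(1, n)
--             if height[i] < height[i - 1] and nd[i] is not None and nd[i] > height[i]]
-- ===== Notes on version B (the rewrite author's own statement) =====
-- stated objective: alternative
-- what changed: Replaces A's per-candidate forward scan for the next different value by a single right-to-left precomputation of each index's next strictly different value, making each candidate an O(1) check.
import Mathlib
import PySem

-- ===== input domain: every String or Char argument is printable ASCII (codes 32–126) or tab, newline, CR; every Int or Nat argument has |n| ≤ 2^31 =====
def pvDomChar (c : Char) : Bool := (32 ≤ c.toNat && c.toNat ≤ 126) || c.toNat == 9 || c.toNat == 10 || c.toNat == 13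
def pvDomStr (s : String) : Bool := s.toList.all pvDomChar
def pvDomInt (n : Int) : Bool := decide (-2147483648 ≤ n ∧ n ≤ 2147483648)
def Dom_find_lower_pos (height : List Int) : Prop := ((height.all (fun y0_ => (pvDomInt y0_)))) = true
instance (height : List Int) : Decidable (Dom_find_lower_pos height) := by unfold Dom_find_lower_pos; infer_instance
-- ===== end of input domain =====

-- B replaces A's per-candidate forward scan by a single right-to-left precomputation of each
-- position's next strictly different value, checked in O(1) per candidate (objective: alternative).

-- ===== PORT A =====
-- inner 'for i in range(pos + 1, n): …' loop with its two breaks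
def pvAInner (height : List Int) (pos : Int) : List Int → List Int
  | [] => []
  | i :: rest =>
    if PySem.List.pyGetD height pos 0 < PySem.List.pyGetD height i 0 then [pos]
    else if PySem.List.pyGetD height pos 0 > PySem.List.pyGetD height i 0 then []
    else pvAInner height pos rest

def find_lower_pos (height : List Int) : List Int :=
  let n : Int := height.length
  let lefts : List Int :=
    (PySem.List.pyRange 1 n).foldl
      (fun acc i =>
        if PySem.List.pyGetD height i 0 < PySem.List.pyGetD height (i - 1) 0 then acc ++ [i]
        else acc) []
  lefts.foldl (fun ac pos => ac ++ pvAInner height pos (PySem.List.pyRange (pos + 1) n)) []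

-- ===== PORT B =====
-- Source B's right-to-left loop filling nd: nd[i] = height[i+1] if it differs, else nd[i+1]
def pvNdArr : List Int → List (Option Int)
  | [] => []
  | [_] => [none]
  | x :: y :: rest =>
    let tail := pvNdArr (y :: rest)
    (if y ≠ x then some y else tail.headD none) :: tail

def find_lower_pos_alt (height : List Int) : List Int :=
  let nd := pvNdArr height
  (PySem.List.pyRange 1 (height.length : Int)).filter
    (fun i =>
      decide (PySem.List.pyGetD height i 0 < PySem.List.pyGetD height (i - 1) 0) &&
      (match PySem.List.pyGetD nd i none with
       | none => false
       | some v => decide (PySem.List.pyGetD height i 0 < v)))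

-- ===== PRECONDITION & SPEC =====
def Spec_find_lower_pos (height : List Int) (out : List Int) : Prop := out = find_lower_pos_alt height
instance (height : List Int) (out : List Int) : Decidable (Spec_find_lower_pos height out) := by unfold Spec_find_lower_pos; infer_instance

-- ===== CLAIM (what is proved, stated in full; the proofs are below) =====
def Claim_equal_find_lower_pos : Prop := ∀ (height : List Int), Dom_find_lower_pos height → Spec_find_lower_pos height (find_lower_pos height)

-- ===== LEMMAS AND PROOFS =====

-- proof-side characterisation: first value in the list that differs from v
def pvNextDiff (v : Int) : List Int → Option Int
  | [] => none
  | y :: rest => if y ≠ v then some y else pvNextDiff v rest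

lemma pvNdArr_getD : ∀ (h : List Int) (i : Nat), i < h.length →
    (pvNdArr h).getD i none = pvNextDiff (h.getD i 0) (h.drop (i + 1)) := by
  intro h
  induction h with
  | nil => intro i hi; simp at hi
  | cons x t ih =>
    cases t with
    | nil =>
      intro i hi
      have : i = 0 := by simp at hi; omega
      subst this
      simp [pvNdArr, pvNextDiff]
    | cons y rest =>
      intro i hi
      cases i with
      | zero =>
        by_cases hxy : y = x
        · subst hxy
          have h0 := ih 0 (by simp)
          simp at h0
          simp [pvNdArr, pvNextDiff, List.head?_eq_getElem?,
            List.getD_eq_getElem?_getD, h0]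
        · simp [pvNdArr, pvNextDiff, hxy]
      | succ j =>
        have hj := ih j (by simpa using hi)
        simp only [pvNdArr]
        simpa [List.getD_cons_succ] using hj

lemma pvAInner_scan (h : List Int) (pos : Int) :
    ∀ (k a : Nat), h.length - a = k →
      pvAInner h pos (PySem.List.pyRange (a : Int) (h.length : Int)) =
        (match pvNextDiff (PySem.List.pyGetD h pos 0) (h.drop a) with
         | none => []
         | some v => if PySem.List.pyGetD h pos 0 < v then [pos] else []) := by
  intro k
  induction k with
  | zero =>
    intro a ha
    have hle : h.length ≤ a := by omega
    rw [PySem.List.pyRange_one_eq_nil (by exact_mod_cast hle)]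
    simp [pvAInner, List.drop_eq_nil_of_le hle, pvNextDiff]
  | succ k ih =>
    intro a ha
    have hlt : a < h.length := by omega
    rw [PySem.List.pyRange_one_cons (by exact_mod_cast hlt)]
    rw [List.drop_eq_getElem_cons hlt]
    have hga : PySem.List.pyGetD h (a : Int) 0 = h[a] := by
      rw [PySem.List.pyGetD_of_nonneg _ _ (by positivity)]
      simp [List.getD_eq_getElem?_getD, hlt]
    simp only [pvAInner, hga, pvNextDiff]
    by_cases h1 : PySem.List.pyGetD h pos 0 < h[a]
    · simp [h1, show h[a] ≠ PySem.List.pyGetD h pos 0 by omega]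
    · by_cases h2 : PySem.List.pyGetD h pos 0 > h[a]
      · simp [h1, h2, show h[a] ≠ PySem.List.pyGetD h pos 0 by omega]
      · have heq : h[a] = PySem.List.pyGetD h pos 0 := by omega
        have := ih (a + 1) (by omega)
        push_cast at this
        simpa [h1, h2, heq] using this

-- generic: distributing a [x]-or-[] flatMap over a filter
lemma pvFlatMapFilter {α : Type} (p q : α → Bool) (f : α → List α) :
    ∀ (l : List α), (∀ x ∈ l, f x = if q x then [x] else []) →
      (l.filter p).flatMap f = l.filter (fun x => p x && q x) := by
  intro l
  induction l with
  | nil => intro _; simp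
  | cons x t ih =>
    intro hf
    have hx := hf x (by simp)
    have ht := ih (fun y hy => hf y (List.mem_cons_of_mem _ hy))
    by_cases hp : p x <;> by_cases hq : q x <;>
      simp [hp, hq, hx, ht]

lemma pvAInner_char (h : List Int) (pos : Int) (h1 : 1 ≤ pos) (h2 : pos < (h.length : Int)) :
    pvAInner h pos (PySem.List.pyRange (pos + 1) (h.length : Int)) =
      (if (match PySem.List.pyGetD (pvNdArr h) pos none with
           | none => false
           | some v => decide (PySem.List.pyGetD h pos 0 < v)) = true
       then [pos] else []) := by
  have hpos0 : 0 ≤ pos := by omega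
  have hcast : (pos + 1 : Int) = ((pos.toNat + 1 : Nat) : Int) := by omega
  have hscan := pvAInner_scan h pos (h.length - (pos.toNat + 1)) (pos.toNat + 1) rfl
  rw [hcast, hscan]
  have hnd : PySem.List.pyGetD (pvNdArr h) pos none =
      pvNextDiff (h.getD pos.toNat 0) (h.drop (pos.toNat + 1)) := by
    rw [PySem.List.pyGetD_of_nonneg _ _ hpos0]
    exact pvNdArr_getD h pos.toNat (by omega)
  have hgp : PySem.List.pyGetD h pos 0 = h.getD pos.toNat 0 :=
    PySem.List.pyGetD_of_nonneg _ _ hpos0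
  rw [hgp, hnd]
  cases pvNextDiff (h.getD pos.toNat 0) (h.drop (pos.toNat + 1)) with
  | none => simp
  | some v => by_cases hv : h.getD pos.toNat 0 < v <;> simp

-- ===== VERDICT (by name: the statement is the Claim_ definition above) =====
theorem find_lower_pos_spec : Claim_equal_find_lower_pos := by
  intro h _
  unfold Spec_find_lower_pos find_lower_pos find_lower_pos_alt
  simp only []
  -- turn A's first loop into a filter
  have hlefts :
      (PySem.List.pyRange 1 (h.length : Int)).foldl
        (fun acc i =>
          if PySem.List.pyGetD h i 0 < PySem.List.pyGetD h (i - 1) 0 then acc ++ [i]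
          else acc) [] =
      (PySem.List.pyRange 1 (h.length : Int)).filter
        (fun i => decide (PySem.List.pyGetD h i 0 < PySem.List.pyGetD h (i - 1) 0)) := by
    have := PySem.List.foldl_append_if
      (fun i => decide (PySem.List.pyGetD h i 0 < PySem.List.pyGetD h (i - 1) 0))
      (fun i => i) (PySem.List.pyRange 1 (h.length : Int)) []
    simpa [List.map_id'] using this
  rw [hlefts, PySem.List.foldl_append_eq_flatMap]
  simp only [List.nil_append]
  exact pvFlatMapFilter _ _ _ _
    (fun pos hmem => by
      obtain ⟨hp1, hp2⟩ := PySem.List.mem_pyRange_one.mp hmem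
      exact pvAInner_char h pos hp1 hp2)
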